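-- pv_equiv track=rewrite | github.com/danielespo/juniper | wsatA1test.py | compute_break_count
-- ===== SOURCE A (Python) =====
-- def evaluate_clause(clause, assignment):
--     for var in clause:
--         x = abs(var)
--         val = assignment.get(x, False)
--         if var > 0 and val:
--             return True
--         elif var < 0 and not val:
--             return True
--     return False
--
-- def compute_break_count(x, clauses, assignment, variable_to_clauses):
--     break_count = 0
--     for idx in variable_to_clauses[x]:
--         clause = clauses[idx]
--         if evaluate_clause(clause, assignment):
--             # Flip x temporarily
--             assignment[x] = not assignment[x]
--             clause_satisfied_after_flip = evaluate_clause(clause, assignment)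
--             # Flip x back
--             assignment[x] = not assignment[x]
--             if not clause_satisfied_after_flip:
--                 break_count += 1
--     return break_count
-- ===== SOURCE B (Python) =====
-- def compute_break_count(x, clauses, assignment, variable_to_clauses):
--     # For each clause of x, one scan classifies its literals: does any literal
--     # not on x satisfy the clause (other_sat), and does x occur positively /
--     # negatively?  A clause breaks on flipping x iff it is satisfied now but
--     # only through x's current value.
--     cur = assignment.get(x, False)
--     break_count = 0
--     for idx in variable_to_clauses[x]:
--         other_sat = False
--         has_pos = False
--         has_neg = False
--         for var in clauses[idx]:
--             if var > 0:
--                 if var == x: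
--                     has_pos = True
--                 else:
--                     other_sat = other_sat or assignment.get(var, False)
--             elif var < 0:
--                 if -var == x:
--                     has_neg = True
--                 else:
--                     other_sat = other_sat or not assignment.get(-var, False)
--         sat_now = other_sat or (has_pos and cur) or (has_neg and not cur)
--         sat_flipped = other_sat or (has_pos and not cur) or (has_neg and cur)
--         if sat_now and not sat_flipped:
--             break_count += 1
--     return break_count
-- ===== Notes on version B (the rewrite author's own statement) =====
-- stated objective: alternative
-- what changed: B replaces A's flip-reevaluate-flip-back scheme (up to three scans of each clause plus two dict mutations) by a single scan per clause that classifies literals into x-literals vs others, then decides satisfied-now and satisfied-after-flip by boolean formulas; Pre_ excludes exactly the inputs where A raises (x missing from variable_to_clauses, an out-of-range clause index, or x missing from assignment while a referenced clause is satisfied).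
import Mathlib
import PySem

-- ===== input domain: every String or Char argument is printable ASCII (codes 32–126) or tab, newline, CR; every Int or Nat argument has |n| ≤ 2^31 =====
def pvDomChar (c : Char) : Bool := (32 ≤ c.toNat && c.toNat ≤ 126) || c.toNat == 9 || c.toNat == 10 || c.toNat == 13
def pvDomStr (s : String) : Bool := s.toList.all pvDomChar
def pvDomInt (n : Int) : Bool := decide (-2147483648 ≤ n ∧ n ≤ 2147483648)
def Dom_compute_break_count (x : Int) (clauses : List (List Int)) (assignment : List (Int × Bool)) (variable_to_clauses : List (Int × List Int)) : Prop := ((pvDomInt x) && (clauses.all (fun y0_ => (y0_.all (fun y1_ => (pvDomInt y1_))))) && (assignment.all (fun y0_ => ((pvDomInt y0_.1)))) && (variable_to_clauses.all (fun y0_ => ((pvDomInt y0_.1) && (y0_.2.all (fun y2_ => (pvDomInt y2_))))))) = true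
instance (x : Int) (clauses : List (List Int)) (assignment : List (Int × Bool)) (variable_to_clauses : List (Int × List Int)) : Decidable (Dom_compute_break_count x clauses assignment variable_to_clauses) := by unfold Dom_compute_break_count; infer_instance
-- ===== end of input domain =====

-- B replaces A's flip/re-evaluate/flip-back per clause by a single classifying scan of the
-- clause and a boolean formula (alternative decomposition, no dict mutation). A temporarily
-- mutates `assignment` but always restores it before returning, so only the return value
-- is at stake.

-- ===== PORT A =====
-- literal port of evaluate_clause (assignment.get(abs(var), False) = Dict.getD)
def evaluate_clause (clause : List Int) (assignment : PySem.Dict Int Bool) : Bool :=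
  match clause with
  | [] => false
  | var :: rest =>
    let val := assignment.getD |var| false
    if var > 0 && val then true
    else if var < 0 && !val then true
    else evaluate_clause rest assignment

def compute_break_count (x : Int) (clauses : List (List Int)) (assignment : List (Int × Bool)) (variable_to_clauses : List (Int × List Int)) : Int :=
  let asg0 : PySem.Dict Int Bool := ⟨assignment⟩
  let vtc : PySem.Dict Int (List Int) := ⟨variable_to_clauses⟩
  let idxs := (vtc.get? x).getD []          -- variable_to_clauses[x]; none = KeyError, excluded by Pre_
  (idxs.foldl (fun (st : Int × PySem.Dict Int Bool) idx =>
    let clause := (PySem.List.pyGet? clauses idx).getD []   -- clauses[idx]; none = IndexError, excluded by Pre_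
    if evaluate_clause clause st.2 then
      -- assignment[x] = not assignment[x]; get? = none is the KeyError, excluded by Pre_
      let a1 := st.2.insert x (! ((st.2.get? x).getD false))
      let after := evaluate_clause clause a1
      let a2 := a1.insert x (! ((a1.get? x).getD false))    -- flip back
      (if !after then st.1 + 1 else st.1, a2)
    else st) ((0 : Int), asg0)).1

-- ===== PORT B =====
-- B's inner for-loop: one scan of the clause maintaining (other_sat, has_pos, has_neg)
def cbcScan (x : Int) (asg : PySem.Dict Int Bool) (clause : List Int) (acc : Bool × Bool × Bool) : Bool × Bool × Bool :=
  match clause with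
  | [] => acc
  | v :: rest =>
    let acc' :=
      if v > 0 then
        (if v = x then (acc.1, true, acc.2.2)
         else (acc.1 || asg.getD v false, acc.2.1, acc.2.2))
      else if v < 0 then
        (if -v = x then (acc.1, acc.2.1, true)
         else (acc.1 || !(asg.getD (-v) false), acc.2.1, acc.2.2))
      else acc
    cbcScan x asg rest acc'

def compute_break_count_alt (x : Int) (clauses : List (List Int)) (assignment : List (Int × Bool)) (variable_to_clauses : List (Int × List Int)) : Int :=
  let asg : PySem.Dict Int Bool := ⟨assignment⟩
  let vtc : PySem.Dict Int (List Int) := ⟨variable_to_clauses⟩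
  let cur := asg.getD x false                               -- assignment.get(x, False)
  (((vtc.get? x).getD []).foldl (fun (bc : Int) idx =>
    let clause := (PySem.List.pyGet? clauses idx).getD []
    let t := cbcScan x asg clause (false, false, false)
    let sat_now := t.1 || (t.2.1 && cur) || (t.2.2 && !cur)
    let sat_flipped := t.1 || (t.2.1 && !cur) || (t.2.2 && cur)
    if sat_now && !sat_flipped then bc + 1 else bc) (0 : Int))

-- ===== PRECONDITION & SPEC =====
-- satisfiability check used only by Pre_ (first-match lookup, as Python's dict.get)
def pvSatClause (clause : List Int) (assignment : List (Int × Bool)) : Bool :=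
  clause.any (fun v =>
    if v > 0 then ((List.lookup v assignment).getD false)
    else if v < 0 then !((List.lookup (-v) assignment).getD false)
    else false)

-- Pre_ excludes exactly the inputs where the Python A raises: x not a key of
-- variable_to_clauses (KeyError), a clause index out of range (IndexError), or x not a key
-- of assignment while some referenced clause is satisfied (KeyError on the flip).
def Pre_compute_break_count (x : Int) (clauses : List (List Int)) (assignment : List (Int × Bool)) (variable_to_clauses : List (Int × List Int)) : Prop :=
  (List.lookup x variable_to_clauses).isSome = true ∧
  (∀ idx ∈ (List.lookup x variable_to_clauses).getD [], (PySem.List.pyGet? clauses idx).isSome = true) ∧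
  ((List.lookup x assignment).isSome = true ∨
    ∀ idx ∈ (List.lookup x variable_to_clauses).getD [],
      pvSatClause ((PySem.List.pyGet? clauses idx).getD []) assignment = false)
instance (x : Int) (clauses : List (List Int)) (assignment : List (Int × Bool)) (variable_to_clauses : List (Int × List Int)) : Decidable (Pre_compute_break_count x clauses assignment variable_to_clauses) := by unfold Pre_compute_break_count; infer_instance

def pvWitness_compute_break_count : Int × List (List Int) × (List (Int × Bool)) × (List (Int × List Int)) :=
  (1, [[1, -2], [2]], [(1, true), (2, false)], [(1, [0]), (2, [0, 1])])

def Spec_compute_break_count (x : Int) (clauses : List (List Int)) (assignment : List (Int × Bool)) (variable_to_clauses : List (Int × List Int)) (out : Int) : Prop := out = compute_break_count_alt x clauses assignment variable_to_clauses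
instance (x : Int) (clauses : List (List Int)) (assignment : List (Int × Bool)) (variable_to_clauses : List (Int × List Int)) (out : Int) : Decidable (Spec_compute_break_count x clauses assignment variable_to_clauses out) := by unfold Spec_compute_break_count; infer_instance

-- ===== CLAIM (what is proved, stated in full; the proofs are below) =====
def Claim_equal_compute_break_count : Prop := ∀ (x : Int) (clauses : List (List Int)) (assignment : List (Int × Bool)) (variable_to_clauses : List (Int × List Int)), Dom_compute_break_count x clauses assignment variable_to_clauses → Pre_compute_break_count x clauses assignment variable_to_clauses → Spec_compute_break_count x clauses assignment variable_to_clauses (compute_break_count x clauses assignment variable_to_clauses)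

-- ===== LEMMAS AND PROOFS =====

-- a Python-side association list and its Dict wrapper look up alike
theorem pv_lookup_eq_get? {β : Type} (l : List (Int × β)) (k : Int) :
    List.lookup k l = (PySem.Dict.mk l).get? k := by
  induction l with
  | nil => simp [PySem.Dict.get?, List.lookup]
  | cons p rest ih =>
    rw [show (p :: rest : List (Int × β)) = (p.1, p.2) :: rest by simp]
    rw [List.lookup, PySem.Dict.get?_mk_cons]
    by_cases h : p.1 = k
    · subst h; simp
    · rw [if_neg (by simpa using h), show (k == p.1) = false by simpa using Ne.symm h, ih]

-- A's clause evaluation under any dict d agreeing with asg off x equals B's formula: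
-- other_sat OR (has_pos AND d[x]) OR (has_neg AND NOT d[x])
theorem pv_eval_spec (x : Int) (asg d : PySem.Dict Int Bool)
    (hagree : ∀ y, y ≠ x → d.getD y false = asg.getD y false) :
    ∀ (clause : List Int) (o hp hn : Bool),
      (o || (hp && d.getD x false) || (hn && !(d.getD x false)) || evaluate_clause clause d) =
        ((cbcScan x asg clause (o, hp, hn)).1
          || ((cbcScan x asg clause (o, hp, hn)).2.1 && d.getD x false)
          || ((cbcScan x asg clause (o, hp, hn)).2.2 && !(d.getD x false))) := by
  intro clause
  induction clause with
  | nil => intro o hp hn; simp [evaluate_clause, cbcScan]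
  | cons v rest ih =>
    intro o hp hn
    rw [evaluate_clause, cbcScan]
    rcases lt_trichotomy v 0 with hv | hv | hv
    · have h1 : ¬ (v > 0) := by omega
      rw [if_neg h1, if_pos hv]
      by_cases hx : -v = x
      · rw [if_pos hx, ← ih, show |v| = x from by rw [abs_of_neg hv, hx]]
        cases hcx : d.getD x false <;> simp [hv, h1]
      · rw [if_neg hx, ← ih, abs_of_neg hv, hagree (-v) hx]
        cases hh : asg.getD (-v) false <;> simp [hv, h1]
    · subst hv
      have h1 : ¬ ((0:Int) > 0) := by omega
      have h2 : ¬ ((0:Int) < 0) := by omega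
      rw [if_neg h1, if_neg h2, ← ih]
      simp
    · rw [if_pos hv]
      by_cases hx : v = x
      · rw [if_pos hx, ← ih, show |v| = x from by rw [abs_of_pos hv, hx]]
        cases hcx : d.getD x false <;> simp [hv, not_lt_of_gt hv]
      · rw [if_neg hx, ← ih, abs_of_pos hv, hagree v hx]
        cases hh : asg.getD v false <;> simp [hv, not_lt_of_gt hv]

theorem pv_eval_congr (x : Int) (asg0 d : PySem.Dict Int Bool)
    (hinv : ∀ k, d.get? k = asg0.get? k) (clause : List Int) :
    evaluate_clause clause d =
      ((cbcScan x asg0 clause (false, false, false)).1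
        || ((cbcScan x asg0 clause (false, false, false)).2.1 && asg0.getD x false)
        || ((cbcScan x asg0 clause (false, false, false)).2.2 && !(asg0.getD x false))) := by
  have hg : ∀ k c, d.getD k c = asg0.getD k c := by
    intro k c; rw [PySem.Dict.getD_eq_get?_getD, hinv k, ← PySem.Dict.getD_eq_get?_getD]
  have h := pv_eval_spec x asg0 d (fun y _ => hg y false) clause false false false
  simpa [hg x false] using h

-- both loops, run from an A-side dict whose every lookup agrees with asg0,
-- count the same clauses (and A's dict keeps agreeing: flip-back restores every lookup)
theorem pv_loop (x : Int) (clauses : List (List Int)) (asg0 : PySem.Dict Int Bool) :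
    ∀ (idxs : List Int) (bc : Int) (d : PySem.Dict Int Bool)
      (_ : ∀ k, d.get? k = asg0.get? k)
      (_ : (asg0.get? x).isSome = true ∨
        ∀ idx ∈ idxs, evaluate_clause ((PySem.List.pyGet? clauses idx).getD []) asg0 = false),
    (idxs.foldl (fun (st : Int × PySem.Dict Int Bool) idx =>
      let clause := (PySem.List.pyGet? clauses idx).getD []
      if evaluate_clause clause st.2 then
        let a1 := st.2.insert x (! ((st.2.get? x).getD false))
        let after := evaluate_clause clause a1
        let a2 := a1.insert x (! ((a1.get? x).getD false))
        (if !after then st.1 + 1 else st.1, a2)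
      else st) (bc, d)).1
    = idxs.foldl (fun (bc : Int) idx =>
      let clause := (PySem.List.pyGet? clauses idx).getD []
      let t := cbcScan x asg0 clause (false, false, false)
      let sat_now := t.1 || (t.2.1 && asg0.getD x false) || (t.2.2 && !(asg0.getD x false))
      let sat_flipped := t.1 || (t.2.1 && !(asg0.getD x false)) || (t.2.2 && asg0.getD x false)
      if sat_now && !sat_flipped then bc + 1 else bc) bc := by
  intro idxs
  induction idxs with
  | nil => intro bc d hinv hpre; rfl
  | cons idx rest ih =>
    intro bc d hinv hpre
    rw [List.foldl_cons, List.foldl_cons]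
    have hsat : evaluate_clause ((PySem.List.pyGet? clauses idx).getD []) d
        = ((cbcScan x asg0 ((PySem.List.pyGet? clauses idx).getD []) (false, false, false)).1
          || ((cbcScan x asg0 ((PySem.List.pyGet? clauses idx).getD []) (false, false, false)).2.1 && asg0.getD x false)
          || ((cbcScan x asg0 ((PySem.List.pyGet? clauses idx).getD []) (false, false, false)).2.2 && !(asg0.getD x false))) :=
      pv_eval_congr x asg0 d hinv _
    have hpre' : (asg0.get? x).isSome = true ∨
        ∀ i ∈ rest, evaluate_clause ((PySem.List.pyGet? clauses i).getD []) asg0 = false := by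
      rcases hpre with h | h
      · exact Or.inl h
      · exact Or.inr (fun i hi => h i (List.mem_cons_of_mem _ hi))
    by_cases hs : evaluate_clause ((PySem.List.pyGet? clauses idx).getD []) d = true
    · -- the clause is satisfied, so x must be a key of asg0 (Pre_ rules out the KeyError)
      have hxsome : (asg0.get? x).isSome = true := by
        rcases hpre with h | h
        · exact h
        · exfalso
          have h0 := h idx (List.mem_cons_self)
          have hc := pv_eval_congr x asg0 asg0 (fun _ => rfl)
            ((PySem.List.pyGet? clauses idx).getD [])
          rw [h0] at hc
          rw [hs] at hsat
          rw [← hsat] at hc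
          exact Bool.false_ne_true hc
      obtain ⟨cv, hcv⟩ := Option.isSome_iff_exists.mp hxsome
      have hdx : d.get? x = some cv := by rw [hinv x, hcv]
      have hgd : asg0.getD x false = cv := by
        rw [PySem.Dict.getD_eq_get?_getD, hcv]; rfl
      have ha1get : ((d.insert x (! ((d.get? x).getD false))).get? x) = some (!cv) := by
        rw [hdx]; exact PySem.Dict.get?_insert_self _ _ _
      have ha1 : ∀ k c, (d.insert x (! ((d.get? x).getD false))).getD k c
          = if k = x then (!cv) else asg0.getD k c := by
        intro k c
        by_cases hk : k = x
        · subst hk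
          rw [if_pos rfl, PySem.Dict.getD_eq_get?_getD, ha1get]; rfl
        · rw [if_neg hk, hdx]
          rw [show ((d.insert x (!(some cv).getD false)).getD k c)
              = d.getD k c from by
            rw [PySem.Dict.getD_eq_get?_getD, PySem.Dict.get?_insert_of_ne _ _ hk,
              ← PySem.Dict.getD_eq_get?_getD]]
          rw [PySem.Dict.getD_eq_get?_getD, hinv k, ← PySem.Dict.getD_eq_get?_getD]
      have hafter : evaluate_clause ((PySem.List.pyGet? clauses idx).getD [])
            (d.insert x (! ((d.get? x).getD false)))
          = ((cbcScan x asg0 ((PySem.List.pyGet? clauses idx).getD []) (false, false, false)).1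
            || ((cbcScan x asg0 ((PySem.List.pyGet? clauses idx).getD []) (false, false, false)).2.1 && !(asg0.getD x false))
            || ((cbcScan x asg0 ((PySem.List.pyGet? clauses idx).getD []) (false, false, false)).2.2 && asg0.getD x false)) := by
        have hg := pv_eval_spec x asg0 (d.insert x (! ((d.get? x).getD false)))
          (fun y hy => by rw [ha1 y false, if_neg hy])
          ((PySem.List.pyGet? clauses idx).getD []) false false false
        have hx1 : (d.insert x (! ((d.get? x).getD false))).getD x false = !cv := by
          rw [ha1 x false, if_pos rfl]
        rw [hgd]
        simpa [hx1] using hg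
      have hcond : ((cbcScan x asg0 ((PySem.List.pyGet? clauses idx).getD []) (false, false, false)).1
          || ((cbcScan x asg0 ((PySem.List.pyGet? clauses idx).getD []) (false, false, false)).2.1 && asg0.getD x false)
          || ((cbcScan x asg0 ((PySem.List.pyGet? clauses idx).getD []) (false, false, false)).2.2 && !(asg0.getD x false))) = true := by
        rw [← hsat]; exact hs
      have hinv2 : ∀ k, ((d.insert x (! ((d.get? x).getD false))).insert x
          (! (((d.insert x (! ((d.get? x).getD false))).get? x).getD false))).get? k
          = asg0.get? k := by
        intro k
        by_cases hk : k = x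
        · subst hk
          rw [PySem.Dict.get?_insert_self, ha1get, hcv]
          simp
        · rw [PySem.Dict.get?_insert_of_ne _ _ hk, PySem.Dict.get?_insert_of_ne _ _ hk,
            hinv k]
      simp only [hs, if_true, hafter, hcond]
      rw [ih _ _ hinv2 hpre']
      simp only [hcond, Bool.true_and]
    · have hs' : evaluate_clause ((PySem.List.pyGet? clauses idx).getD []) d = false := by
        cases h : evaluate_clause ((PySem.List.pyGet? clauses idx).getD []) d
        · rfl
        · exact absurd h hs
      have hcond : ((cbcScan x asg0 ((PySem.List.pyGet? clauses idx).getD []) (false, false, false)).1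
          || ((cbcScan x asg0 ((PySem.List.pyGet? clauses idx).getD []) (false, false, false)).2.1 && asg0.getD x false)
          || ((cbcScan x asg0 ((PySem.List.pyGet? clauses idx).getD []) (false, false, false)).2.2 && !(asg0.getD x false))) = false := by
        rw [← hsat]; exact hs'
      simp only [hs', Bool.false_eq_true, if_false, hcond, Bool.false_and]
      exact ih _ _ hinv hpre'

-- Pre_'s proof-free satisfiability check agrees with A's evaluate_clause
theorem pv_sat_bridge (assignment : List (Int × Bool)) :
    ∀ clause, pvSatClause clause assignment = evaluate_clause clause ⟨assignment⟩ := by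
  intro clause
  induction clause with
  | nil => rfl
  | cons v rest ih =>
    rw [pvSatClause, List.any_cons, evaluate_clause]
    have hg : ∀ k : Int, (PySem.Dict.mk assignment).getD k false
        = (List.lookup k assignment).getD false := by
      intro k; rw [PySem.Dict.getD_eq_get?_getD, pv_lookup_eq_get?]
    rcases lt_trichotomy v 0 with hv | hv | hv
    · have h1 : ¬ (v > 0) := by omega
      rw [if_neg h1, if_pos hv, hg, abs_of_neg hv]
      cases h : (List.lookup (-v) assignment).getD false <;>
        simp [h1, hv] <;> simpa [pvSatClause] using ih
    · subst hv
      have h1 : ¬ ((0:Int) > 0) := by omega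
      have h2 : ¬ ((0:Int) < 0) := by omega
      rw [if_neg h1, if_neg h2]
      simpa [pvSatClause] using ih
    · rw [if_pos hv, hg, abs_of_pos hv]
      cases h : (List.lookup v assignment).getD false <;>
        simp [hv, not_lt_of_gt hv] <;> simpa [pvSatClause] using ih

-- ===== VERDICT (by name: the statement is the Claim_ definition above) =====
theorem compute_break_count_spec : Claim_equal_compute_break_count := by
  intro x clauses assignment variable_to_clauses _hdom hpre
  obtain ⟨_h1, _h2, h3⟩ := hpre
  unfold Spec_compute_break_count compute_break_count compute_break_count_alt
  refine pv_loop x clauses ⟨assignment⟩ _ 0 ⟨assignment⟩ (fun _ => rfl) ?_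
  rcases h3 with h | h
  · left; rw [← pv_lookup_eq_get?]; exact h
  · right; intro idx hidx
    rw [← pv_sat_bridge]
    apply h
    rwa [pv_lookup_eq_get?]
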